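-- pv_equiv track=rewrite | github.com/Renki-mipt/Software-Systems-Design | Architecture_programming/kwic/kwic_Anastas_2.py | get_shifts
-- ===== SOURCE A (Python) =====
-- def shift_line(line):
-- 	words = line.strip().split()
-- 	words.append(words.pop(0))
-- 	return ' '.join(words)
--
-- def get_shifts(line):
-- 	words_num = len(line.split())
-- 	shifts = [line]
-- 	shifted = line
-- 	for i in range(words_num - 1):
-- 		shifted = shift_line(shifted)
-- 		shifts.append(shifted)
-- 	return shifts
-- ===== SOURCE B (Python) =====
-- def get_shifts(line):
-- 	words = line.split()
-- 	shifts = [line]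
-- 	for i in range(1, len(words)):
-- 		shifts.append(' '.join(words[i:] + words[:i]))
-- 	return shifts
-- ===== Notes on version B (the rewrite author's own statement) =====
-- stated objective: simpler
-- what changed: B splits the line once and builds each rotation directly by list slicing (words[i:] + words[:i]), instead of A's repeated mutate-join-restrip-resplit of a running string through a helper.
import Mathlib
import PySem

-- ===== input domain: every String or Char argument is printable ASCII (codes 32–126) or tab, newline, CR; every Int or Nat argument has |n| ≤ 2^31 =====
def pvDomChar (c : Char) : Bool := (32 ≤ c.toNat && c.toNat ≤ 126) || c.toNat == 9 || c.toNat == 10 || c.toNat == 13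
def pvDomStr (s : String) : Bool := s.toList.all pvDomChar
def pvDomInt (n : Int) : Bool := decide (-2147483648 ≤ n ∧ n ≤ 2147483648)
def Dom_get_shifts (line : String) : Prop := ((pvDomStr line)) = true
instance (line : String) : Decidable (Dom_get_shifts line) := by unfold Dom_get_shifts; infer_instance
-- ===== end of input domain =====

-- B builds each rotation directly by slicing the once-split word list instead of A's
-- repeated mutate/join/strip/re-split of a running string (objective: simpler).

-- ===== PORT A =====
-- shift_line: 'none' marks Python's IndexError (pop from an empty word list);
-- inside get_shifts that case is unreachable, and the loop then keeps the state unchanged.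
def shift_line (line : String) : Option String :=
  let words := PySem.Str.split₀ (PySem.Str.strip line)
  match PySem.List.pop? words 0 with
  | none => none
  | some (w, rest) => some (PySem.Str.join " " (rest ++ [w]))

def get_shifts (line : String) : List String :=
  let words_num : Int := (PySem.Str.split₀ line).length
  let st := (PySem.List.pyRange 0 (words_num - 1) 1).foldl
    (fun (st : List String × Option String) _ =>
      match st.2 with
      | none => st
      | some shifted =>
        match shift_line shifted with
        | none => (st.1, none)
        | some shifted' => (st.1 ++ [shifted'], some shifted'))
    ([line], some line)
  st.1

-- ===== PORT B =====
def get_shifts_alt (line : String) : List String :=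
  let words := PySem.Str.split₀ line
  let n : Int := words.length
  (PySem.List.pyRange 1 n 1).foldl
    (fun shifts i =>
      shifts ++ [PySem.Str.join " "
        (PySem.List.slice words (some i) none ++ PySem.List.slice words none (some i))])
    [line]

-- ===== PRECONDITION & SPEC =====
def Spec_get_shifts (line : String) (out : List String) : Prop := out = get_shifts_alt line
instance (line : String) (out : List String) : Decidable (Spec_get_shifts line out) := by unfold Spec_get_shifts; infer_instance

-- ===== CLAIM (what is proved, stated in full; the proofs are below) =====
def Claim_equal_get_shifts : Prop := ∀ (line : String), Dom_get_shifts line → Spec_get_shifts line (get_shifts line)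

-- ===== LEMMAS AND PROOFS =====

-- a "word": nonempty, no whitespace characters
def pvGoodWord (w : List Char) : Prop := w ≠ [] ∧ ∀ c ∈ w, PySem.Chars.isspace c = false

-- split₀.go consumes a whitespace-free block into cur
theorem pvGo_word (w : List Char) (hw : ∀ c ∈ w, PySem.Chars.isspace c = false) :
    ∀ (rest cur : List Char) (acc : List (List Char)),
      PySem.Chars.split₀.go (w ++ rest) cur acc
        = PySem.Chars.split₀.go rest (w.reverse ++ cur) acc := by
  induction w with
  | nil => intro rest cur acc; simp
  | cons c w ih =>
    intro rest cur acc
    have hc := hw c (by simp)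
    simp only [List.cons_append, PySem.Chars.split₀.go, hc]
    rw [ih (fun d hd => hw d (by simp [hd])) rest (c :: cur) acc]
    simp

-- split₀.go on an all-whitespace tail just flushes cur
theorem pvGo_allspace (t : List Char) (ht : ∀ c ∈ t, PySem.Chars.isspace c = true) :
    ∀ (cur : List Char) (acc : List (List Char)),
      PySem.Chars.split₀.go t cur acc = PySem.Chars.split₀.go [] cur acc := by
  induction t with
  | nil => intro cur acc; rfl
  | cons c t ih =>
    intro cur acc
    have hc := ht c (by simp)
    have ih' := fun cur acc => ih (fun d hd => ht d (by simp [hd])) cur acc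
    simp only [PySem.Chars.split₀.go, hc, if_true]
    by_cases hcur : cur.isEmpty
    · simp only [hcur, if_true, ih']
      simp [PySem.Chars.split₀.go, hcur]
    · simp only [hcur, ih']
      simp only [PySem.Chars.split₀.go]
      simp [List.isEmpty]

-- trailing whitespace does not change split₀.go's result
theorem pvGo_append_space (s : List Char) :
    ∀ (t : List Char), (∀ c ∈ t, PySem.Chars.isspace c = true) →
    ∀ (cur : List Char) (acc : List (List Char)),
      PySem.Chars.split₀.go (s ++ t) cur acc = PySem.Chars.split₀.go s cur acc := by
  induction s with
  | nil => intro t ht cur acc; simpa using pvGo_allspace t ht cur acc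
  | cons c s ih =>
    intro t ht cur acc
    by_cases hc : PySem.Chars.isspace c = true
    · simp only [List.cons_append, PySem.Chars.split₀.go, hc, if_true]
      by_cases hcur : cur.isEmpty <;> simp [hcur, ih t ht]
    · simp only [List.cons_append, PySem.Chars.split₀.go, eq_false_of_ne_true hc]
      simp [ih t ht]

theorem pvSplit₀_strip (s : List Char) :
    PySem.Chars.split₀ (PySem.Chars.strip s) = PySem.Chars.split₀ s := by
  have hl : ∀ u : List Char, PySem.Chars.split₀ (PySem.Chars.lstrip u) = PySem.Chars.split₀ u := by
    intro u
    induction u with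
    | nil => rfl
    | cons c u ih =>
      by_cases hc : PySem.Chars.isspace c = true
      · have h1 : PySem.Chars.lstrip (c :: u) = PySem.Chars.lstrip u := by
          simp [PySem.Chars.lstrip, List.dropWhile_cons, hc]
        have h2 : PySem.Chars.split₀ (c :: u) = PySem.Chars.split₀ u := by
          simp [PySem.Chars.split₀, PySem.Chars.split₀.go, hc]
        rw [h1, h2]; exact ih
      · simp [PySem.Chars.lstrip, List.dropWhile_cons, hc]
  have hr : ∀ u : List Char, PySem.Chars.split₀ (PySem.Chars.rstrip u) = PySem.Chars.split₀ u := by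
    intro u
    have hdec : u = PySem.Chars.rstrip u ++ (u.reverse.takeWhile PySem.Chars.isspace).reverse := by
      unfold PySem.Chars.rstrip
      conv_lhs => rw [← List.reverse_reverse u, ← List.takeWhile_append_dropWhile (p := PySem.Chars.isspace) (l := u.reverse)]
      rw [List.reverse_append]
    conv_rhs => rw [hdec]
    unfold PySem.Chars.split₀
    rw [pvGo_append_space _ _ (by intro c hc; simp at hc; exact List.mem_takeWhile_imp (by simpa using hc))]
  unfold PySem.Chars.strip
  rw [hr, hl]

theorem pvGo_join (ws : List (List Char)) (h : ∀ w ∈ ws, pvGoodWord w) (hne : ws ≠ []) :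
    ∀ acc, PySem.Chars.split₀.go (PySem.Chars.join [' '] ws) [] acc = acc.reverse ++ ws := by
  induction ws with
  | nil => simp at hne
  | cons w ws ih =>
    intro acc
    obtain ⟨hwne, hwsp⟩ := h w (by simp)
    cases ws with
    | nil =>
      have hj : PySem.Chars.join [' '] [w] = w := by
        simp [PySem.Chars.join, List.intercalate, List.intersperse]
      rw [hj]
      have h2 := pvGo_word w hwsp [] [] acc
      simp only [List.append_nil] at h2
      rw [h2]
      simp only [PySem.Chars.split₀.go]
      rw [if_neg (by simpa [List.isEmpty_iff] using hwne)]
      simp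
    | cons v vs =>
      have hjoin : PySem.Chars.join [' '] (w :: v :: vs)
          = w ++ ' ' :: PySem.Chars.join [' '] (v :: vs) := by
        simp [PySem.Chars.join, List.intercalate, List.intersperse]
      rw [hjoin, pvGo_word w hwsp]
      simp only [PySem.Chars.split₀.go]
      rw [if_pos (by decide)]
      rw [if_neg (by simpa [List.isEmpty_iff] using hwne)]
      simp only [List.append_nil, List.reverse_reverse]
      rw [ih (fun u hu => h u (by simp [hu])) (by simp) (w :: acc)]
      simp

-- split₀ of a single-space join of good words gives the words back
theorem pvSplit₀_join (ws : List (List Char)) (h : ∀ w ∈ ws, pvGoodWord w) (hne : ws ≠ []) :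
    PySem.Chars.split₀ (PySem.Chars.join [' '] ws) = ws := by
  unfold PySem.Chars.split₀
  rw [pvGo_join ws h hne]
  simp

theorem pvGo_good (s : List Char) :
    ∀ (cur : List Char) (acc : List (List Char)),
      (∀ c ∈ cur, PySem.Chars.isspace c = false) →
      (∀ w ∈ acc, pvGoodWord w) →
      ∀ w ∈ PySem.Chars.split₀.go s cur acc, pvGoodWord w := by
  induction s with
  | nil =>
    intro cur acc hcur hacc w hw
    simp only [PySem.Chars.split₀.go] at hw
    by_cases hc : cur.isEmpty
    · rw [if_pos hc] at hw
      simp only [List.mem_reverse] at hw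
      exact hacc w hw
    · rw [if_neg hc] at hw
      simp only [List.mem_reverse, List.mem_cons] at hw
      rcases hw with hw | hw
      · subst hw
        refine ⟨by simpa [List.isEmpty_iff] using hc, ?_⟩
        intro d hd
        exact hcur d (List.mem_reverse.mp hd)
      · exact hacc w hw
  | cons c s ih =>
    intro cur acc hcur hacc w hw
    simp only [PySem.Chars.split₀.go] at hw
    by_cases hc : PySem.Chars.isspace c = true
    · rw [if_pos hc] at hw
      by_cases hcure : cur.isEmpty
      · rw [if_pos hcure] at hw
        exact ih [] acc (by simp) hacc w hw
      · rw [if_neg hcure] at hw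
        refine ih [] _ (by simp) ?_ w hw
        intro u hu
        rcases List.mem_cons.mp hu with h1 | h1
        · subst h1
          refine ⟨by simpa [List.isEmpty_iff] using hcure, ?_⟩
          intro d hd
          exact hcur d (List.mem_reverse.mp hd)
        · exact hacc u h1
    · rw [if_neg hc] at hw
      refine ih (c :: cur) acc ?_ hacc w hw
      intro d hd
      rcases List.mem_cons.mp hd with h1 | h1
      · subst h1; simpa using hc
      · exact hcur d h1

-- every piece produced by split₀ is a good word
theorem pvSplit₀_good (s : List Char) : ∀ w ∈ PySem.Chars.split₀ s, pvGoodWord w :=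
  pvGo_good s [] [] (by simp) (by simp)

theorem pvToList_inj : Function.Injective String.toList := by
  intro a b h
  exact String.ext (by simpa [String.toList] using h)

-- String-level rotation of the word list
def pvRot (ws : List String) (k : Nat) : List String := ws.drop k ++ ws.take k

theorem pvStr_split_strip (line : String) :
    PySem.Str.split₀ (PySem.Str.strip line) = PySem.Str.split₀ line := by
  apply List.map_injective_iff.mpr pvToList_inj
  rw [PySem.Str.split₀_map_toList, PySem.Str.split₀_map_toList, PySem.Str.toList_strip,
    pvSplit₀_strip]

theorem pvStr_split_strip_join (us : List String)
    (h : ∀ u ∈ us, pvGoodWord u.toList) (hne : us ≠ []) :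
    PySem.Str.split₀ (PySem.Str.strip (PySem.Str.join " " us)) = us := by
  apply List.map_injective_iff.mpr pvToList_inj
  rw [PySem.Str.split₀_map_toList, PySem.Str.toList_strip, PySem.Str.toList_join,
    pvSplit₀_strip]
  have : (" " : String).toList = [' '] := rfl
  rw [this, pvSplit₀_join]
  · intro w hw
    obtain ⟨u, hu, rfl⟩ := List.mem_map.mp hw
    exact h u hu
  · simpa using hne

theorem pvRot_step (ws : List String) (k : Nat) (hk : k < ws.length) :
    pvRot ws k = ws[k] :: (ws.drop (k+1) ++ ws.take k)
      ∧ (ws.drop (k+1) ++ ws.take k) ++ [ws[k]] = pvRot ws (k+1) := by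
  constructor
  · unfold pvRot
    rw [List.drop_eq_getElem_cons hk, List.cons_append]
  · unfold pvRot
    rw [List.take_add_one, List.getElem?_eq_getElem hk]
    simp

-- the running string after k shifts
def pvS (line : String) (k : Nat) : String :=
  if k = 0 then line else PySem.Str.join " " (pvRot (PySem.Str.split₀ line) k)

theorem pvGood_words (line : String) :
    ∀ u ∈ PySem.Str.split₀ line, pvGoodWord u.toList := by
  intro u hu
  have := pvSplit₀_good line.toList
  rw [← PySem.Str.split₀_map_toList] at this
  exact this u.toList (List.mem_map_of_mem hu)

theorem pvShift_step (line : String) (k : Nat)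
    (hk : k < (PySem.Str.split₀ line).length) :
    shift_line (pvS line k)
      = some (PySem.Str.join " " (pvRot (PySem.Str.split₀ line) (k + 1))) := by
  set ws := PySem.Str.split₀ line with hws
  have hne : ws ≠ [] := by
    intro h; rw [h] at hk; simp at hk
  have hsplit : PySem.Str.split₀ (PySem.Str.strip (pvS line k)) = pvRot ws k := by
    unfold pvS
    by_cases h0 : k = 0
    · rw [if_pos h0, pvStr_split_strip, h0]
      unfold pvRot; simpa using hws.symm
    · rw [if_neg h0, pvStr_split_strip_join]
      · intro u hu
        have : u ∈ ws := by
          have := List.mem_append.mp hu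
          rcases this with h | h
          · exact List.mem_of_mem_drop h
          · exact List.mem_of_mem_take h
        exact pvGood_words line u this
      · intro h
        have hlen := congrArg List.length h
        simp only [pvRot, List.length_append, List.length_drop, List.length_take,
          List.length_nil] at hlen
        rw [← hws] at hlen
        omega
  obtain ⟨hcons, happ⟩ := pvRot_step ws k hk
  unfold shift_line
  rw [hsplit, hcons]
  simp only [PySem.List.pop?_zero_cons]
  rw [happ]

theorem pvA_loop (line : String) (k : Nat)
    (hk : k ≤ (PySem.Str.split₀ line).length - 1) :
    (PySem.List.pyRange 0 (k : Int) 1).foldl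
      (fun (st : List String × Option String) _ =>
        match st.2 with
        | none => st
        | some shifted =>
          match shift_line shifted with
          | none => (st.1, none)
          | some shifted' => (st.1 ++ [shifted'], some shifted'))
      ([line], some line)
    = (line :: (List.range k).map
        (fun j => PySem.Str.join " " (pvRot (PySem.Str.split₀ line) (j + 1))),
       some (pvS line k)) := by
  induction k with
  | zero =>
    simp [PySem.List.pyRange_zero_nat, pvS]
  | succ k ih =>
    have hk' : k ≤ (PySem.Str.split₀ line).length - 1 := Nat.le_of_succ_le hk
    have hlt : k < (PySem.Str.split₀ line).length := by
      have h1 : 1 ≤ (PySem.Str.split₀ line).length := by omega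
      omega
    have hr : PySem.List.pyRange 0 ((k : Int) + 1) 1
        = PySem.List.pyRange 0 (k : Int) 1 ++ [(k : Int)] :=
      PySem.List.pyRange_one_succ_right (by positivity)
    rw [show ((k + 1 : Nat) : Int) = (k : Int) + 1 by push_cast; ring, hr,
      List.foldl_append, ih hk']
    simp only [List.foldl_cons, List.foldl_nil]
    rw [pvShift_step line k hlt]
    simp only [pvS, Nat.succ_ne_zero, if_neg]
    rw [List.range_succ]
    simp [pvS]

theorem pvA_closed (line : String) :
    get_shifts line
      = line :: (List.range ((PySem.Str.split₀ line).length - 1)).map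
          (fun j => PySem.Str.join " " (pvRot (PySem.Str.split₀ line) (j + 1))) := by
  unfold get_shifts
  dsimp only
  set n := (PySem.Str.split₀ line).length with hn
  by_cases h0 : n = 0
  · rw [h0]
    rw [PySem.List.pyRange_one_eq_nil (by norm_num)]
    simp
  · have h1 : (n : Int) - 1 = ((n - 1 : Nat) : Int) := by omega
    rw [h1, pvA_loop line (n - 1) (by omega)]

theorem pvB_closed (line : String) :
    get_shifts_alt line
      = line :: (List.range ((PySem.Str.split₀ line).length - 1)).map
          (fun j => PySem.Str.join " " (pvRot (PySem.Str.split₀ line) (j + 1))) := by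
  unfold get_shifts_alt
  dsimp only
  set ws := PySem.Str.split₀ line with hws
  rw [PySem.List.foldl_append_singleton_eq_map]
  rw [PySem.List.pyRange_one, List.map_map]
  have hlen : ((ws.length : Int) - 1).toNat = ws.length - 1 := by omega
  rw [hlen]
  simp only [List.singleton_append, List.cons.injEq, true_and]
  apply List.map_congr_left
  intro k hk
  simp only [Function.comp_apply]
  have hpos : (0 : Int) ≤ 1 + (k : Int) := by omega
  rw [PySem.List.slice_from ws hpos, PySem.List.slice_to ws hpos]
  have : ((1 : Int) + (k : Int)).toNat = k + 1 := by omega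
  rw [this]
  rfl

-- ===== VERDICT (by name: the statement is the Claim_ definition above) =====
theorem get_shifts_spec : Claim_equal_get_shifts := by
  intro line _
  unfold Spec_get_shifts
  rw [pvA_closed, pvB_closed]
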